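-- pv_equiv track=rewrite | github.com/seanzmc/27vette | scripts/audit_order_guide_staging.py | variant_columns
-- ===== SOURCE A (Python) =====
-- from collections import Counter, defaultdict
--
-- def variant_columns(variants: list[dict[str, str]]) -> dict[str, list[dict[str, str]]]:
--     grouped: dict[str, list[dict[str, str]]] = defaultdict(list)
--     for row in variants:
--         grouped[row.get("source_sheet", "")].append(
--             {
--                 "model_key": row.get("model_key", ""),
--                 "body_code": row.get("body_code", ""),
--                 "body_style": row.get("body_style", ""),
--                 "trim_level": row.get("trim_level", ""),
--                 "variant_label": row.get("variant_label", ""),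
--                 "confidence": row.get("confidence", ""),
--             }
--         )
--     return {
--         sheet: sorted(rows, key=lambda row: (row["model_key"], row["body_code"], row["trim_level"], row["variant_label"]))
--         for sheet, rows in sorted(grouped.items())
--     }
-- ===== SOURCE B (Python) =====
-- def variant_columns(variants: list[dict[str, str]]) -> dict[str, list[dict[str, str]]]:
--     pairs = [
--         (
--             row.get("source_sheet", ""),
--             {
--                 "model_key": row.get("model_key", ""),
--                 "body_code": row.get("body_code", ""),
--                 "body_style": row.get("body_style", ""),
--                 "trim_level": row.get("trim_level", ""),
--                 "variant_label": row.get("variant_label", ""),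
--                 "confidence": row.get("confidence", ""),
--             },
--         )
--         for row in variants
--     ]
--     ordered = sorted(
--         pairs,
--         key=lambda p: (p[0], p[1]["model_key"], p[1]["body_code"], p[1]["trim_level"], p[1]["variant_label"]),
--     )
--     out: dict[str, list[dict[str, str]]] = {}
--     for sheet, projected in ordered:
--         out.setdefault(sheet, []).append(projected)
--     return out
-- ===== Notes on version B (the rewrite author's own statement) =====
-- stated objective: alternative
-- what changed: Instead of grouping rows per sheet, sorting each group and sorting the group keys, B does one global stable sort of (sheet, projected_row) pairs by the 5-part key (sheet, model_key, body_code, trim_level, variant_label) and then a single grouping pass whose insertion order yields sorted sheets and sorted rows.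
import Mathlib
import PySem

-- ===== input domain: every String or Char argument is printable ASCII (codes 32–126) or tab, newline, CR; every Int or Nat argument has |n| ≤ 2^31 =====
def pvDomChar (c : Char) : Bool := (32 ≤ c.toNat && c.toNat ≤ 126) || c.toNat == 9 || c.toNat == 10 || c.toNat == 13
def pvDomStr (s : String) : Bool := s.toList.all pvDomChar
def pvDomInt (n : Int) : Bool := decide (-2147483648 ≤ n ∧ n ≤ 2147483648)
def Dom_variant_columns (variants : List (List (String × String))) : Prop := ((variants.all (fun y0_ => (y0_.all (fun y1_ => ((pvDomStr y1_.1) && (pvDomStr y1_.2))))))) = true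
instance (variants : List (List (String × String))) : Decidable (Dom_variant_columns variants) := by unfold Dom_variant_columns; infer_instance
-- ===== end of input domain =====

-- B replaces A's group-then-sort-each-group with one global stable sort of (sheet, projected row)
-- pairs followed by a single grouping pass (objective: alternative decomposition, same cost).

-- shared helpers: row.get(k, "") on an input dict (first-match lookup), and the projected row
def pvRowGet (row : List (String × String)) (k : String) : String :=
  (PySem.Dict.mk row).getD k ""

def pvProj (row : List (String × String)) : List (String × String) :=
  [("model_key", pvRowGet row "model_key"),
   ("body_code", pvRowGet row "body_code"),
   ("body_style", pvRowGet row "body_style"),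
   ("trim_level", pvRowGet row "trim_level"),
   ("variant_label", pvRowGet row "variant_label"),
   ("confidence", pvRowGet row "confidence")]

-- the 4-string tuple key (row["model_key"], row["body_code"], row["trim_level"], row["variant_label"]),
-- ported as a List String (lexicographic order = Python's tuple order on equal-length string tuples);
-- projected rows always carry these keys, so getD "" is exact for row[k]
def pvKey4 (r : List (String × String)) : List String :=
  [pvRowGet r "model_key", pvRowGet r "body_code", pvRowGet r "trim_level", pvRowGet r "variant_label"]

-- ===== PORT A =====
-- grouped[row.get("source_sheet","")].append(proj) on a defaultdict(list) = modify key [] (· ++ [proj]);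
-- sorted(grouped.items()) is ported with key p.1: dict keys are unique, so Python's tuple
-- comparison never reaches the second component
def variant_columns (variants : List (List (String × String))) : List (String × List (List (String × String))) :=
  let grouped := variants.foldl
    (fun d row => d.modify (pvRowGet row "source_sheet") [] (fun v => v ++ [pvProj row]))
    PySem.Dict.empty
  (PySem.List.sorted grouped.items (fun p => p.1)).map
    (fun p => (p.1, PySem.List.sorted p.2 pvKey4))

-- ===== PORT B =====
-- one (sheet, projected row) pair per input row, one global stable sort by the 5-part key
-- (ported as sheet :: pvKey4, the tuple of 5 strings), then a single grouping pass:
-- out.setdefault(sheet, []).append(projected) = modify sheet [] (· ++ [projected])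
def variant_columns_alt (variants : List (List (String × String))) : List (String × List (List (String × String))) :=
  let pairs := variants.map (fun row => (pvRowGet row "source_sheet", pvProj row))
  let ordered := PySem.List.sorted pairs (fun p => p.1 :: pvKey4 p.2)
  (ordered.foldl (fun d p => d.modify p.1 [] (fun v => v ++ [p.2])) PySem.Dict.empty).items

-- ===== PRECONDITION & SPEC =====
def Spec_variant_columns (variants : List (List (String × String))) (out : List (String × List (List (String × String)))) : Prop := out = variant_columns_alt variants
instance (variants : List (List (String × String))) (out : List (String × List (List (String × String)))) : Decidable (Spec_variant_columns variants out) := by unfold Spec_variant_columns; infer_instance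

-- ===== CLAIM (what is proved, stated in full; the proofs are below) =====
def Claim_equal_variant_columns : Prop := ∀ (variants : List (List (String × String))), Dom_variant_columns variants → Spec_variant_columns variants (variant_columns variants)

-- ===== LEMMAS AND PROOFS =====

-- PySem.List.sorted does not depend on which (subsingleton) DecidableLT instance is used
theorem pv_sorted_congr {α κ : Type} [LT κ] {i1 i2 : DecidableLT κ} (l : List α) (k : α → κ) :
    @PySem.List.sorted α κ _ i1 l k false = @PySem.List.sorted α κ _ i2 l k false := by
  have h : i1 = i2 := by funext a b; exact Subsingleton.elim _ _
  rw [h]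

-- sorted with the canonical LinearOrder instances (used to state the order lemmas uniformly)
def pvSorted {α κ : Type} [LinearOrder κ] (l : List α) (k : α → κ) : List α :=
  @PySem.List.sorted α κ _ (@LinearOrder.toDecidableLT κ _) l k false

-- the grouping fold (shared by both ports): items = first-occurrence sheets, each with the
-- in-order projections of its rows
theorem pv_groupF_items {β : Type} [DecidableEq β] (l : List (String × β)) :
    (l.foldl (fun d p => d.modify p.1 [] (fun v => v ++ [p.2])) PySem.Dict.empty).items
      = (PySem.List.dedup (l.map (·.1))).map
          (fun s => (s, (l.filter (fun p => p.1 == s)).map (·.2))) := by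
  have hn : (l.foldl (fun d p => d.modify p.1 [] (fun v => v ++ [p.2])) PySem.Dict.empty).keys.Nodup := by
    exact PySem.Dict.nodup_keys_foldl_modify_key l (·.1) [] (fun _ p v => v ++ [p.2]) _ PySem.Dict.nodup_keys_empty
  rw [PySem.Dict.items_eq_map_keys _ hn []]
  have hk : (l.foldl (fun d p => d.modify p.1 [] (fun v => v ++ [p.2])) PySem.Dict.empty).keys
      = PySem.List.dedup (l.map (·.1)) := by
    rw [PySem.Dict.keys_foldl_modify_key l (·.1) [] (fun _ p v => v ++ [p.2])]
    simp [PySem.Dict.keys_empty, PySem.Set.update_nil_left, PySem.List.dedup_eq_ofList]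
  rw [hk]
  refine List.map_congr_left (fun s _ => ?_)
  rw [PySem.Dict.getD_foldl_modify_append l PySem.Dict.empty s]
  simp [PySem.Dict.getD_empty]

-- PySem.List.dedup keeps a subsequence of its input
theorem pv_foldl_add_sub {α : Type} [BEq α] (xs : List α) :
    ∀ acc : List α, ∃ t, xs.foldl PySem.Set.add acc = acc ++ t ∧ t.Sublist xs := by
  induction xs with
  | nil => intro acc; exact ⟨[], by simp, List.Sublist.refl _⟩
  | cons x xs ih =>
    intro acc
    simp only [List.foldl_cons, PySem.Set.add]
    by_cases h : PySem.Set.contains acc x = true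
    · simp only [h, if_true]
      obtain ⟨t, ht, hs⟩ := ih acc
      exact ⟨t, ht, hs.cons x⟩
    · simp only [h]
      obtain ⟨t, ht, hs⟩ := ih (acc ++ [x])
      exact ⟨x :: t, by simpa using ht, hs.cons₂ x⟩

theorem pv_dedup_sublist {α : Type} [BEq α] (xs : List α) :
    (PySem.List.dedup xs).Sublist xs := by
  obtain ⟨t, ht, hs⟩ := pv_foldl_add_sub xs []
  simpa [PySem.List.dedup, PySem.Set.ofList, PySem.Set.empty, ht] using hs

-- insertBy unfolding equations (definitional)
theorem pv_insertBy_nil {α : Type} (b : α → α → Bool) (x : α) :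
    PySem.List.insertBy b x [] = [x] := rfl

theorem pv_insertBy_cons {α : Type} (b : α → α → Bool) (x y : α) (t : List α) :
    PySem.List.insertBy b x (y :: t) = if b x y then x :: y :: t else y :: PySem.List.insertBy b x t := rfl

-- insertBy goes to the front when it beats every element
theorem pv_insertBy_front {α : Type} (b : α → α → Bool) (x : α) (l : List α)
    (h : ∀ z ∈ l, b x z = true) :
    PySem.List.insertBy b x l = x :: l := by
  cases l with
  | nil => rfl
  | cons y t => simp [pv_insertBy_cons, h y (by simp)]

-- insertBy preserves sortedness of the accumulator
theorem pv_pairwise_insertBy {α κ : Type} [LinearOrder κ] (k : α → κ) (x : α) (acc : List α)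
    (hacc : acc.Pairwise (fun a b => k a ≤ k b)) :
    (PySem.List.insertBy (fun a b => decide (k a < k b)) x acc).Pairwise (fun a b => k a ≤ k b) := by
  induction acc with
  | nil => simp [pv_insertBy_nil]
  | cons y t ih =>
    rw [List.pairwise_cons] at hacc
    obtain ⟨hy, ht⟩ := hacc
    by_cases h : k x < k y
    · simp only [pv_insertBy_cons, h, decide_true, if_true]
      refine List.pairwise_cons.mpr ⟨?_, List.pairwise_cons.mpr ⟨hy, ht⟩⟩
      intro z hz
      rcases List.mem_cons.mp hz with rfl | hz
      · exact le_of_lt h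
      · exact le_of_lt (lt_of_lt_of_le h (hy z hz))
    · simp only [pv_insertBy_cons, h, decide_false]
      refine List.pairwise_cons.mpr ⟨?_, ih ht⟩
      intro z hz
      rcases (PySem.List.mem_insertBy _ x z t).mp hz with rfl | hz
      · exact le_of_not_gt h
      · exact hy z hz

-- one insertBy step seen through filter + map, on a sorted accumulator
theorem pv_step {α β κ κ' : Type} [LinearOrder κ] [LinearOrder κ']
    (P : α → Bool) (g : α → β) (k5 : α → κ) (k4 : β → κ')
    (hiff : ∀ a b, P a = true → P b = true → (k5 a < k5 b ↔ k4 (g a) < k4 (g b)))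
    (x : α) (acc : List α) (hacc : acc.Pairwise (fun a b => k5 a ≤ k5 b)) :
    ((PySem.List.insertBy (fun a b => decide (k5 a < k5 b)) x acc).filter P).map g
      = if P x then
          PySem.List.insertBy (fun a b => decide (k4 a < k4 b)) (g x) ((acc.filter P).map g)
        else (acc.filter P).map g := by
  induction acc with
  | nil => by_cases hPx : P x <;> simp [pv_insertBy_nil, hPx]
  | cons y t ih =>
    rw [List.pairwise_cons] at hacc
    obtain ⟨hy, ht⟩ := hacc
    by_cases h : k5 x < k5 y
    · simp only [pv_insertBy_cons, h, decide_true, if_true]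
      by_cases hPx : P x
      · have hfront : PySem.List.insertBy (fun a b => decide (k4 a < k4 b)) (g x)
            (((y :: t).filter P).map g) = g x :: ((y :: t).filter P).map g := by
          refine pv_insertBy_front _ _ _ ?_
          intro z hz
          simp only [List.mem_map, List.mem_filter] at hz
          obtain ⟨w, ⟨hw, hPw⟩, rfl⟩ := hz
          have hle : k5 y ≤ k5 w := by
            rcases List.mem_cons.mp hw with rfl | hw
            · exact le_refl _
            · exact hy w hw
          exact decide_eq_true ((hiff x w hPx hPw).mp (lt_of_lt_of_le h hle))
        simp [hPx, hfront]
      · simp [hPx]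
    · simp only [pv_insertBy_cons, h, decide_false]
      have hR := ih ht
      by_cases hPx : P x
      · simp only [hPx, if_true] at hR ⊢
        by_cases hPy : P y
        · have hnot : ¬ k4 (g x) < k4 (g y) := fun hc => h ((hiff x y hPx hPy).mpr hc)
          simp [hPy, hR, pv_insertBy_cons, hnot]
        · simp [hPy, hR]
      · simp only [hPx] at hR ⊢
        by_cases hPy : P y <;> simp [hPy, hR]

-- the whole insertion-sort fold seen through filter + map
theorem pv_fold_filter {α β κ κ' : Type} [LinearOrder κ] [LinearOrder κ']
    (P : α → Bool) (g : α → β) (k5 : α → κ) (k4 : β → κ')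
    (hiff : ∀ a b, P a = true → P b = true → (k5 a < k5 b ↔ k4 (g a) < k4 (g b)))
    (l : List α) : ∀ (acc : List α), acc.Pairwise (fun a b => k5 a ≤ k5 b) →
    ((l.foldl (fun a x => PySem.List.insertBy (fun p q => decide (k5 p < k5 q)) x a) acc).filter P).map g
      = ((l.filter P).map g).foldl
          (fun a r => PySem.List.insertBy (fun p q => decide (k4 p < k4 q)) r a)
          ((acc.filter P).map g) := by
  induction l with
  | nil => intro acc _; simp
  | cons x t ih =>
    intro acc hacc
    simp only [List.foldl_cons]
    rw [ih _ (pv_pairwise_insertBy k5 x acc hacc)]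
    rw [pv_step P g k5 k4 hiff x acc hacc]
    by_cases hPx : P x <;> simp [hPx]

-- filtering a stable sort by the composite key = stable sort of the filtered projection
theorem pv_sorted_filter {α β κ κ' : Type} [LinearOrder κ] [LinearOrder κ']
    (P : α → Bool) (g : α → β) (k5 : α → κ) (k4 : β → κ')
    (hiff : ∀ a b, P a = true → P b = true → (k5 a < k5 b ↔ k4 (g a) < k4 (g b)))
    (l : List α) :
    ((pvSorted l k5).filter P).map g = pvSorted ((l.filter P).map g) k4 := by
  show ((PySem.List.sorted l k5).filter P).map g = PySem.List.sorted ((l.filter P).map g) k4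
  rw [PySem.List.sorted_eq_foldl_insertBy l k5, PySem.List.sorted_eq_foldl_insertBy ((l.filter P).map g) k4]
  simpa using pv_fold_filter P g k5 k4 hiff l [] (by simp)

-- first occurrences of the sort's fst-projections = the sorted distinct fst-projections
theorem pv_dedup_sorted {α κ : Type} [LinearOrder κ] [BEq κ] [LawfulBEq κ]
    (f : α → κ) (k5 : α → List κ) (hf : ∀ a, ∃ r, k5 a = f a :: r) (l : List α) :
    pvSorted (PySem.List.dedup (l.map f)) (fun x => x)
      = PySem.List.dedup ((pvSorted l k5).map f) := by
  unfold pvSorted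
  apply PySem.List.sorted_id_eq_of_perm_of_pairwise
  · refine (List.perm_ext_iff_of_nodup (PySem.List.nodup_dedup _) (PySem.List.nodup_dedup _)).mpr ?_
    intro x
    simp only [PySem.List.mem_dedup, List.mem_map]
    constructor
    · rintro ⟨a, ha, rfl⟩
      exact ⟨a, (@PySem.List.mem_sorted α (List κ) List.instLinearOrder.toLT LinearOrder.toDecidableLT l k5 false a).mp ha, rfl⟩
    · rintro ⟨a, ha, rfl⟩
      exact ⟨a, (@PySem.List.mem_sorted α (List κ) List.instLinearOrder.toLT LinearOrder.toDecidableLT l k5 false a).mpr ha, rfl⟩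
  · have hp : ((pvSorted l k5).map f).Pairwise (fun a b => a ≤ b) := by
      unfold pvSorted
      refine List.pairwise_map.mpr ?_
      refine (PySem.List.sorted_pairwise l k5).imp ?_
      intro a b hab
      obtain ⟨ra, hra⟩ := hf a
      obtain ⟨rb, hrb⟩ := hf b
      rw [hra, hrb] at hab
      rcases lt_or_eq_of_le hab with hlt | heq
      · exact List.head_le_of_lt hlt
      · exact le_of_eq (by injection heq)
    exact hp.sublist (pv_dedup_sublist _)

-- ===== VERDICT (by name: the statement is the Claim_ definition above) =====
theorem variant_columns_spec : Claim_equal_variant_columns := by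
  intro variants _
  unfold Spec_variant_columns variant_columns variant_columns_alt
  -- canonicalise the DecidableLT instances of every List-String-keyed sort
  have hcL : ∀ {γ : Type} (l : List γ) (k : γ → List String),
      PySem.List.sorted l k = pvSorted l k := fun l k => pv_sorted_congr l k
  have hcS : ∀ {γ : Type} (l : List γ) (k : γ → String),
      PySem.List.sorted l k = pvSorted l k := fun l k => pv_sorted_congr l k
  simp only [hcL, hcS]
  set prs := variants.map (fun row => (pvRowGet row "source_sheet", pvProj row)) with hprs
  -- A's grouping fold over variants is the grouping fold over the pairs list
  have hfold : variants.foldl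
      (fun d row => d.modify (pvRowGet row "source_sheet") [] (fun v => v ++ [pvProj row]))
      PySem.Dict.empty
      = prs.foldl (fun d p => d.modify p.1 [] (fun v => v ++ [p.2])) PySem.Dict.empty := by
    rw [hprs, List.foldl_map]
  simp only [hfold, pv_groupF_items]
  set D := PySem.List.dedup (prs.map (·.1)) with hD
  set F : String → List (List (String × String)) :=
    fun s => (prs.filter (fun p => p.1 == s)).map (·.2) with hF
  -- step (a): sorting A's items by fst = mapping over the sorted distinct sheets
  have ha : pvSorted (D.map (fun s => (s, F s))) (fun p => p.1)
      = (pvSorted D (fun x => x)).map (fun s => (s, F s)) := by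
    unfold pvSorted
    apply PySem.List.sorted_eq_of_perm_of_pairwise_lt
    · exact (PySem.List.sorted_perm D (fun x => x) false).map _
    · refine List.pairwise_map.mpr ?_
      have h1 := PySem.List.sorted_ofList_pairwise_lt (κ := String) (prs.map (·.1))
      rw [← PySem.List.dedup_eq_ofList, ← hD] at h1
      exact h1.imp (fun h => h)
  rw [ha, List.map_map]
  -- step (b1): B's key order = sorted distinct sheets
  have hb1 : PySem.List.dedup ((pvSorted prs (fun p => p.1 :: pvKey4 p.2)).map (·.1))
      = pvSorted D (fun x => x) := by
    rw [hD]
    exact (pv_dedup_sorted (·.1) (fun p => p.1 :: pvKey4 p.2) (fun a => ⟨pvKey4 a.2, rfl⟩) prs).symm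
  rw [hb1]
  -- step (b2): B's per-sheet run = A's per-sheet stable sort
  refine (List.map_congr_left (fun s _ => ?_)).symm
  have hiff : ∀ a b : String × List (String × String),
      (a.1 == s) = true → (b.1 == s) = true →
      ((a.1 :: pvKey4 a.2) < (b.1 :: pvKey4 b.2) ↔ pvKey4 a.2 < pvKey4 b.2) := by
    intro a b ha' hb'
    have ha'' : a.1 = s := by simpa using ha'
    have hb'' : b.1 = s := by simpa using hb'
    rw [ha'', hb'', List.cons_lt_cons_iff]
    simp
  have hfil := pv_sorted_filter (fun p => p.1 == s) (·.2)
    (fun p => p.1 :: pvKey4 p.2) pvKey4 hiff prs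
  simp only [Function.comp_apply, hfil, hF]
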